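-- pv_equiv track=rewrite | github.com/kcac108108/rag_test | app/services/sql_service.py | _upper_sql
-- ===== SOURCE A (Python) =====
-- def _upper_sql(sql: str) -> str:
--     if not sql:
--         return sql
--     out = []
--     in_str = False
--     for ch in sql:
--         if ch == "'":
--             in_str = not in_str
--             out.append(ch)
--         else:
--             out.append(ch if in_str else ch.upper())
--     return "".join(out)
-- ===== SOURCE B (Python) =====
-- def _upper_sql(sql: str) -> str:
--     if not sql:
--         return sql
--     parts = sql.split("'")
--     return "'".join(seg.upper() if i % 2 == 0 else seg
--                     for i, seg in enumerate(parts))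
-- ===== Notes on version B (the rewrite author's own statement) =====
-- stated objective: simpler
-- what changed: Replaces the per-character loop with an in_str toggle by one split on the quote character: segments at even indices are outside quotes and get uppercased, odd-indexed segments stay unchanged, then the pieces are rejoined with a quote.
import Mathlib
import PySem

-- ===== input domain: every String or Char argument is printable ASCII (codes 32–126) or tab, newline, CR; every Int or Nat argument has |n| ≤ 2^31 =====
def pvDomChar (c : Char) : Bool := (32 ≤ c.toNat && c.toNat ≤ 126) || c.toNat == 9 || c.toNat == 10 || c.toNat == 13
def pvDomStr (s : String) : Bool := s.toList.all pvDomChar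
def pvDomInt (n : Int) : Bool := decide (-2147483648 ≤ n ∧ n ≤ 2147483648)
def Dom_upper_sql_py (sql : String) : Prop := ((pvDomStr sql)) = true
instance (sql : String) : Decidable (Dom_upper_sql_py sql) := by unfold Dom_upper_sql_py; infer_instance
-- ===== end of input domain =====

-- B replaces A's per-character loop with an in_str toggle by splitting on the
-- quote character and uppercasing the even-indexed segments (simpler decomposition).


-- ===== PORT A =====
-- for-loop over the characters with the `out` list and the `in_str` toggle;
-- "".join(out) becomes String.mk of the accumulated char list.
def upper_sql_py (sql : String) : String :=
  if sql = "" then sql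
  else
    let r := sql.toList.foldl
      (fun (st : List Char × Bool) ch =>
        if ch == '\'' then (st.1 ++ [ch], !st.2)
        else (st.1 ++ [if st.2 then ch else PySem.Chars.upperChar ch], st.2))
      ([], false)
    String.mk r.1

-- ===== PORT B =====
-- sql.split("'") → PySem.Chars.splitOn; "'".join(…) → PySem.Chars.join;
-- seg.upper() → PySem.Chars.upper; enumerate → PySem.List.enumerate.
def upper_sql_py_alt (sql : String) : String :=
  if sql = "" then sql
  else
    let parts := PySem.Chars.splitOn sql.toList ['\'']
    String.mk (PySem.Chars.join ['\'']
      ((PySem.List.enumerate parts 0).map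
        (fun p => if PySem.Int.mod p.1 2 == 0 then PySem.Chars.upper p.2 else p.2)))

-- ===== PRECONDITION & SPEC =====
def Spec_upper_sql_py (sql : String) (out : String) : Prop := out = upper_sql_py_alt sql
instance (sql : String) (out : String) : Decidable (Spec_upper_sql_py sql out) := by unfold Spec_upper_sql_py; infer_instance

-- ===== CLAIM (what is proved, stated in full; the proofs are below) =====
def Claim_equal_upper_sql_py : Prop := ∀ (sql : String), Dom_upper_sql_py sql → Spec_upper_sql_py sql (upper_sql_py sql)

-- ===== LEMMAS AND PROOFS =====

-- alternate map: `true` means "this segment is outside quotes, uppercase it"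
def altMap : Bool → List (List Char) → List (List Char)
  | _, [] => []
  | b, p :: ps => (if b then p.map PySem.Chars.upperChar else p) :: altMap (!b) ps

theorem altMap_ne_nil (b : Bool) (ps : List (List Char)) (h : ps ≠ []) :
    altMap b ps ≠ [] := by
  cases ps with
  | nil => exact absurd rfl h
  | cons p ps => simp [altMap]

theorem intercalate_cons_of_ne_nil (sep x : List Char) (xs : List (List Char)) (h : xs ≠ []) :
    List.intercalate sep (x :: xs) = x ++ sep ++ List.intercalate sep xs := by
  cases xs with
  | nil => exact absurd rfl h
  | cons y ys => simp [List.intercalate, List.intersperse]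

theorem intercalate_cons₂ {sep x y : List Char} {ys : List (List Char)} :
    List.intercalate sep (x :: y :: ys) = x ++ sep ++ List.intercalate sep (y :: ys) :=
  intercalate_cons_of_ne_nil _ _ _ (by simp)

theorem splitOn_go_spec (q : Char) :
    ∀ (fuel : Nat) (l cur : List Char) (acc : List (List Char)), l.length ≤ fuel →
      PySem.Chars.splitOn.go [q] fuel l cur acc
        = acc.reverse ++ List.modifyHead (cur.reverse ++ ·) (List.splitOnP (· == q) l) := by
  intro fuel
  induction fuel with
  | zero =>
    intro l cur acc hl
    have : l = [] := List.eq_nil_of_length_eq_zero (Nat.le_zero.mp hl)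
    subst this
    simp [PySem.Chars.splitOn.go, List.splitOnP_nil]
  | succ fuel ih =>
    intro l cur acc hl
    cases l with
    | nil => simp [PySem.Chars.splitOn.go, List.splitOnP_nil]
    | cons c rest =>
      have hrest : rest.length ≤ fuel := by simpa using Nat.lt_succ_iff.mp (by simpa using hl)
      by_cases hc : c = q
      · subst hc
        have hpre : List.isPrefixOf [c] (c :: rest) = true := by
          simp [List.isPrefixOf]
        rw [PySem.Chars.splitOn.go]
        simp only [hpre, if_pos]
        rw [show List.drop [c].length (c :: rest) = rest by simp]
        rw [ih rest [] (cur.reverse :: acc) hrest]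
        simp [List.splitOnP_cons]
        cases List.splitOnP (fun x => x == c) rest <;> simp
      · have hpre : List.isPrefixOf [q] (c :: rest) = false := by
          simp [List.isPrefixOf]
          exact fun h => absurd h.symm hc
        rw [PySem.Chars.splitOn.go]
        simp only [hpre, Bool.false_eq_true, if_neg, not_false_iff]
        rw [ih rest (c :: cur) acc hrest]
        rw [List.splitOnP_cons]
        simp only [beq_iff_eq, hc, if_neg, not_false_iff]
        obtain ⟨p, ps, hps⟩ := List.exists_cons_of_ne_nil (List.splitOnP_ne_nil (· == q) rest)
        rw [hps]
        simp

theorem splitOn_single (q : Char) (cs : List Char) :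
    PySem.Chars.splitOn cs [q] = List.splitOnP (· == q) cs := by
  rw [PySem.Chars.splitOn, splitOn_go_spec q (cs.length + 1) cs [] [] (Nat.le_succ _)]
  obtain ⟨p, ps, hps⟩ := List.exists_cons_of_ne_nil (List.splitOnP_ne_nil (· == q) cs)
  rw [hps]; simp

theorem foldl_loop_spec (cs : List Char) :
    ∀ (instr : Bool) (acc : List Char),
      (cs.foldl
        (fun (st : List Char × Bool) ch =>
          if ch == '\'' then (st.1 ++ [ch], !st.2)
          else (st.1 ++ [if st.2 then ch else PySem.Chars.upperChar ch], st.2))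
        (acc, instr)).1
      = acc ++ List.intercalate ['\''] (altMap (!instr) (List.splitOnP (· == '\'') cs)) := by
  induction cs with
  | nil =>
    intro instr acc
    simp [List.splitOnP_nil, altMap, List.intercalate]
  | cons c rest ih =>
    intro instr acc
    by_cases hc : c = '\''
    · subst hc
      simp only [List.foldl_cons, beq_self_eq_true, if_pos]
      rw [ih (!instr) (acc ++ ['\''])]
      rw [List.splitOnP_cons]
      simp only [beq_self_eq_true, if_pos]
      have hne := List.splitOnP_ne_nil (· == '\'') rest
      rw [show altMap (!instr) ([] :: List.splitOnP (· == '\'') rest)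
            = [] :: altMap (!(!instr)) (List.splitOnP (· == '\'') rest) by
        cases instr <;> simp [altMap]]
      rw [intercalate_cons_of_ne_nil _ _ _ (altMap_ne_nil _ _ hne)]
      simp
    · have hbeq : (c == '\'') = false := by simp [hc]
      simp only [List.foldl_cons, hbeq, Bool.false_eq_true, if_neg, not_false_iff]
      rw [ih instr (acc ++ [if instr then c else PySem.Chars.upperChar c])]
      rw [List.splitOnP_cons]
      simp only [hbeq, Bool.false_eq_true, if_neg, not_false_iff]
      obtain ⟨p, ps, hps⟩ := List.exists_cons_of_ne_nil (List.splitOnP_ne_nil (· == '\'') rest)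
      rw [hps]
      simp only [List.modifyHead_cons]
      cases ps with
      | nil =>
        cases instr <;> simp [altMap, List.intercalate]
      | cons p2 ps2 =>
        cases instr <;>
          · simp only [altMap, Bool.not_true, Bool.not_false]
            rw [intercalate_cons₂, intercalate_cons₂]
            simp

theorem enum_map_altMap (ps : List (List Char)) :
    ∀ (k : Nat),
      (PySem.List.enumerate ps (k : Int)).map
        (fun p => if PySem.Int.mod p.1 2 == 0 then PySem.Chars.upper p.2 else p.2)
      = altMap (k % 2 == 0) ps := by
  induction ps with
  | nil => intro k; simp [PySem.List.enumerate_nil, altMap]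
  | cons p ps ih =>
    intro k
    rw [PySem.List.enumerate_cons]
    have hstep : ((k : Int) + 1) = ((k + 1 : Nat) : Int) := by push_cast; ring
    rw [List.map_cons, hstep, ih (k + 1)]
    have hpar : ((k + 1) % 2 == 0) = !(k % 2 == 0) := by
      rcases Nat.mod_two_eq_zero_or_one k with h | h <;> simp [Nat.add_mod, h]
    rw [hpar]
    have hm : PySem.Int.mod (k : Int) 2 = ((k % 2 : Nat) : Int) := by
      simp [PySem.Int.mod, Int.fmod_eq_emod_of_nonneg]
    cases hk : (k % 2 == 0)
    all_goals simp [altMap, PySem.Chars.upper]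
    all_goals (intro h; exfalso; simp at hk; omega)

-- ===== VERDICT (by name: the statement is the Claim_ definition above) =====
theorem upper_sql_py_spec : Claim_equal_upper_sql_py := by
  intro sql _
  unfold Spec_upper_sql_py upper_sql_py upper_sql_py_alt
  by_cases h : sql = ""
  · simp [h]
  · simp only [h, if_neg, not_false_iff]
    rw [splitOn_single, foldl_loop_spec sql.toList false []]
    have := enum_map_altMap (List.splitOnP (· == '\'') sql.toList) 0
    simp only [Nat.cast_zero] at this
    rw [this]
    simp [PySem.Chars.join]
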